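-- pv_equiv track=rewrite | github.com/IbnuEyni/neo4j-movie-recommendation | convert_movies.py | process_apostrophe
-- ===== SOURCE A (Python) =====
-- def process_apostrophe(text):
--     result = []
--     skip_next = False
--
--     for i, char in enumerate(text):
--         if skip_next:
--             skip_next = False
--             continue
--         if char == "'":
--             skip_next = True
--         else:
--             result.append(char)
--
--     return ''.join(result)
-- ===== SOURCE B (Python) =====
-- import re
--
-- def process_apostrophe(text):
--     # one regex substitution: delete each apostrophe plus the (optional) character after it
--     return re.sub(r"'.?", "", text, flags=re.DOTALL)
-- ===== Notes on version B (the rewrite author's own statement) =====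
-- stated objective: idiomatic
-- what changed: Replaced the manual enumerate loop with a skip_next boolean state machine by a single re.sub call (pattern: apostrophe plus one optional following character, DOTALL) that deletes each apostrophe together with the character after it.
import Mathlib
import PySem

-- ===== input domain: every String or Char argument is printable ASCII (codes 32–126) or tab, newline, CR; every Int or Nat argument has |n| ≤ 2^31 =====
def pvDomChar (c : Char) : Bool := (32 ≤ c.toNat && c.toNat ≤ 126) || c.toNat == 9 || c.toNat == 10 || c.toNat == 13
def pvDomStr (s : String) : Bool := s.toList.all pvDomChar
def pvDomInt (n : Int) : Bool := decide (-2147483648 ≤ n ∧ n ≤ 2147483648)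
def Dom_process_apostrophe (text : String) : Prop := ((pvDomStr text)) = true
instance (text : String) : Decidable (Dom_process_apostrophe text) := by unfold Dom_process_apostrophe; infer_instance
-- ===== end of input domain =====

-- B replaces A's skip_next state machine by one regex substitution re.sub(r"'.?", "", text, flags=re.DOTALL) (idiomatic; a timing run measured B faster by a constant factor).

-- ===== PORT A =====
-- loop body of A: state = (result, skip_next)
def pvStepA (st : List Char × Bool) (p : Int × Char) : List Char × Bool :=
  if st.2 then (st.1, false)
  else if p.2 = '\'' then (st.1, true)
  else (st.1 ++ [p.2], false)

def process_apostrophe (text : String) : String :=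
  String.ofList ((PySem.List.enumerate text.toList 0).foldl pvStepA ([], false)).1

-- ===== PORT B =====
-- Hand port of re.sub(r"'.?", "", text, flags=re.DOTALL): the regex engine's leftmost
-- scan — at each position, a "'" matches together with its optional next character and
-- is replaced by nothing, any other character is left in place. Exact on all strings.
def altGo : List Char → List Char
  | [] => []
  | [c] => if c = '\'' then [] else [c]
  | c :: d :: rest => if c = '\'' then altGo rest else c :: altGo (d :: rest)

def process_apostrophe_alt (text : String) : String :=
  String.ofList (altGo text.toList)

-- ===== PRECONDITION & SPEC =====
def Spec_process_apostrophe (text : String) (out : String) : Prop := out = process_apostrophe_alt text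
instance (text : String) (out : String) : Decidable (Spec_process_apostrophe text out) := by unfold Spec_process_apostrophe; infer_instance

-- ===== CLAIM (what is proved, stated in full; the proofs are below) =====
def Claim_equal_process_apostrophe : Prop := ∀ (text : String), Dom_process_apostrophe text → Spec_process_apostrophe text (process_apostrophe text)

-- ===== LEMMAS AND PROOFS =====
lemma foldA_eq_altGo : ∀ (l : List Char) (n : Int) (acc : List Char),
    ((PySem.List.enumerate l n).foldl pvStepA (acc, false)).1 = acc ++ altGo l := by
  intro l
  induction l using altGo.induct with
  | case1 =>
      intro n acc
      simp [PySem.List.enumerate_nil, altGo]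
  | case2 =>
      intro n acc
      simp [PySem.List.enumerate_cons, PySem.List.enumerate_nil, altGo, pvStepA]
  | case3 c h =>
      intro n acc
      simp [PySem.List.enumerate_cons, PySem.List.enumerate_nil, altGo, pvStepA, h]
  | case4 d rest ih =>
      intro n acc
      simp only [PySem.List.enumerate_cons, List.foldl_cons, pvStepA,
        if_neg (Bool.false_ne_true), if_pos rfl, altGo]
      exact ih (n + 1 + 1) acc
  | case5 c d rest h ih =>
      intro n acc
      have h2 := ih (n + 1) (acc ++ [c])
      simp only [PySem.List.enumerate_cons, List.foldl_cons, pvStepA,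
        if_neg (Bool.false_ne_true), if_neg h] at h2 ⊢
      rw [h2]
      simp [altGo, h]

-- ===== VERDICT (by name: the statement is the Claim_ definition above) =====
theorem process_apostrophe_spec : Claim_equal_process_apostrophe := by
  intro text _
  unfold Spec_process_apostrophe process_apostrophe process_apostrophe_alt
  rw [foldA_eq_altGo text.toList 0 []]
  simp
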